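-- pv_equiv track=rewrite | github.com/kungming2/translator-BOT-reborn | title/title_handling.py | _generate_multi_flair_text
-- ===== SOURCE A (Python) =====
-- def _generate_multi_flair_text(language_codes: list[str], max_length: int = 64) -> str:
--     """
--     Build the flair display string for a multiple-language post.
--
--     Fits as many language codes as possible within max_length, abbreviating
--     by dropping trailing codes if the full list would exceed the limit.
--
--     Args:
--         language_codes: List of uppercase preferred codes to include.
--         max_length: Maximum character length for the resulting string.
--
--     Returns:
--         A string like "Multiple Languages [DE, FR, ZH]", truncated if needed.
--     """
--     sorted_codes = sorted(language_codes)
--     full_text = f"Multiple Languages [{', '.join(sorted_codes)}]"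
--
--     if len(full_text) <= max_length:
--         return full_text
--
--     prefix = "Multiple Languages ["
--     suffix = "]"
--     max_content_length = max_length - len(prefix) - len(suffix)
--
--     included_codes: list[str] = []
--     current_length = 0
--
--     for code in sorted_codes:
--         separator_length = 2 if included_codes else 0  # ", "
--         code_length = len(code) + separator_length
--         if current_length + code_length <= max_content_length:
--             included_codes.append(code)
--             current_length += code_length
--         else:
--             break
--
--     return f"{prefix}{', '.join(included_codes)}{suffix}"
-- ===== SOURCE B (Python) =====
-- def _generate_multi_flair_text(language_codes: list[str], max_length: int = 64) -> str:
--     """Prefix-sum table + binary search re-implementation.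
--
--     cum[k] = rendered content length of the first k sorted codes
--     (len of each code, plus 2 for the ', ' before every code after the first).
--     Binary-search the monotone table for the largest k with
--     cum[k] <= max_length - 21 (21 = len('Multiple Languages [') + len(']'));
--     the all-fit early return of the original is subsumed (k = n there).
--     """
--     codes = sorted(language_codes)
--     n = len(codes)
--     cum = [0]
--     for i, c in enumerate(codes):
--         cum.append(cum[i] + len(c) + (2 if i else 0))
--     budget = max_length - 21
--     lo, hi = 0, n
--     while lo < hi:
--         mid = (lo + hi + 1) // 2
--         if cum[mid] <= budget:
--             lo = mid
--         else:
--             hi = mid - 1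
--     return "Multiple Languages [" + ", ".join(codes[:lo]) + "]"
-- ===== Notes on version B (the rewrite author's own statement) =====
-- stated objective: alternative
-- what changed: The greedy accumulate-and-break loop (plus a redundant early full-text return) is replaced by building a cumulative-content-length prefix table and binary-searching it for the largest fitting prefix; the all-fit case falls out of the search instead of a separate return.
import Mathlib
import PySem

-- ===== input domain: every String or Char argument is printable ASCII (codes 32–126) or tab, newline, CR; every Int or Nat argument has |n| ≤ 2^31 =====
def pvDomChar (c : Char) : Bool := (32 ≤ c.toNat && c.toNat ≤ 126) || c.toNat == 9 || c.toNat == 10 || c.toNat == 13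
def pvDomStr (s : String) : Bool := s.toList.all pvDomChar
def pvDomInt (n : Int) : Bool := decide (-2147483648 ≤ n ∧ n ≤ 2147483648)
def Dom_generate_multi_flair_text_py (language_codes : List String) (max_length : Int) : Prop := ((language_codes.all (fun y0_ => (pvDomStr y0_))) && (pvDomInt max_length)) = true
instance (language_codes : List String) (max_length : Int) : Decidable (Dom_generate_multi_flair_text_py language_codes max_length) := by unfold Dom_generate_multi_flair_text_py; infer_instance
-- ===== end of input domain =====

-- B replaces A's greedy accumulate-and-break loop (and its redundant early full-text return)
-- by a cumulative-length prefix table searched by binary search; same result, alternative structure.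

-- ===== PORT A =====
-- the body of A's for-loop (break modelled by the Bool 'broken' flag in the state)
def pvStepA (m : Int) (st : List String × Int × Bool) (code : String) : List String × Int × Bool :=
  if st.2.2 then st
  else
    let separator_length : Int := if st.1.isEmpty then 0 else 2
    let code_length := PySem.Str.len code + separator_length
    if st.2.1 + code_length ≤ m then (st.1 ++ [code], st.2.1 + code_length, st.2.2)
    else (st.1, st.2.1, true)

def generate_multi_flair_text_py (language_codes : List String) (max_length : Int) : String :=
  let sorted_codes := PySem.List.sorted language_codes (fun x => x) false
  let full_text := "Multiple Languages [" ++ PySem.Str.join ", " sorted_codes ++ "]"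
  if PySem.Str.len full_text ≤ max_length then full_text
  else
    let prefix_ := "Multiple Languages ["
    let suffix_ := "]"
    let max_content_length := max_length - PySem.Str.len prefix_ - PySem.Str.len suffix_
    let st := sorted_codes.foldl (pvStepA max_content_length) (([] : List String), (0 : Int), false)
    prefix_ ++ PySem.Str.join ", " st.1 ++ suffix_

-- ===== PORT B =====
-- the body of B's cum-building loop: cum.append(cum[i] + len(c) + (2 if i else 0))
def pvStepB (acc : List Int) (ic : Int × String) : List Int :=
  acc ++ [PySem.List.pyGetD acc ic.1 0 + PySem.Str.len ic.2 + (if ic.1 = 0 then 0 else 2)]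

-- B's hand-written while-loop binary search
def pvBisect (cum : List Int) (budget : Int) (lo hi : Nat) : Nat :=
  if lo < hi then
    if cum.getD ((lo + hi + 1) / 2) 0 ≤ budget then pvBisect cum budget ((lo + hi + 1) / 2) hi
    else pvBisect cum budget lo ((lo + hi + 1) / 2 - 1)
  else lo
termination_by hi - lo
decreasing_by all_goals omega

def generate_multi_flair_text_py_alt (language_codes : List String) (max_length : Int) : String :=
  let codes := PySem.List.sorted language_codes (fun x => x) false
  let n := codes.length
  let cum := (PySem.List.enumerate codes).foldl pvStepB [0]
  let budget := max_length - 21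
  let lo := pvBisect cum budget 0 n
  "Multiple Languages [" ++ PySem.Str.join ", " (codes.take lo) ++ "]"

-- ===== PRECONDITION & SPEC =====
def Spec_generate_multi_flair_text_py (language_codes : List String) (max_length : Int) (out : String) : Prop := out = generate_multi_flair_text_py_alt language_codes max_length
instance (language_codes : List String) (max_length : Int) (out : String) : Decidable (Spec_generate_multi_flair_text_py language_codes max_length out) := by unfold Spec_generate_multi_flair_text_py; infer_instance

-- ===== CLAIM (what is proved, stated in full; the proofs are below) =====
def Claim_equal_generate_multi_flair_text_py : Prop := ∀ (language_codes : List String) (max_length : Int), Dom_generate_multi_flair_text_py language_codes max_length → Spec_generate_multi_flair_text_py language_codes max_length (generate_multi_flair_text_py language_codes max_length)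

-- ===== LEMMAS AND PROOFS =====

-- rendered content length of a list of codes: Σ len + 2·(count − 1) separators
def pvG (l : List String) : Int :=
  if l.isEmpty then 0 else (l.map (fun s => ((s.toList.length : Int)))).sum + 2 * ((l.length : Int) - 1)

lemma pvG_append_singleton (l : List String) (c : String) :
    pvG (l ++ [c]) = pvG l + (c.toList.length : Int) + (if l.length = 0 then 0 else 2) := by
  cases l with
  | nil => simp [pvG]
  | cons x xs => simp [pvG]; ring

lemma pvG_cons_cons (p q : String) (rest : List String) :
    pvG (p :: q :: rest) = (p.toList.length : Int) + 2 + pvG (q :: rest) := by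
  simp [pvG]; ring

lemma pvJoinLen (l : List String) :
    ((PySem.Str.join ", " l).toList.length : Int) = pvG l := by
  rw [PySem.Str.toList_join]
  induction l with
  | nil => simp [PySem.Chars.join_nil, pvG]
  | cons p l ih =>
    cases l with
    | nil => simp [PySem.Chars.join_singleton, pvG]
    | cons q rest =>
      simp only [List.map_cons] at ih ⊢
      rw [PySem.Chars.join_cons_cons, pvG_cons_cons, ← ih]
      simp only [List.length_append, Nat.cast_add]
      have h2 : ((", ".toList.length : Int)) = 2 := by decide
      rw [h2]

-- monotonicity of the prefix content length
lemma pvG_take_mono_succ (l : List String) (j : Nat) : pvG (l.take j) ≤ pvG (l.take (j + 1)) := by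
  rw [List.take_add_one]
  cases h : l[j]? with
  | none => simp
  | some c =>
    simp only [Option.toList_some]
    rw [pvG_append_singleton]
    have : (0 : Int) ≤ (c.toList.length : Int) := Int.natCast_nonneg _
    split_ifs <;> linarith

lemma pvG_take_mono (l : List String) (a b : Nat) (hab : a ≤ b) :
    pvG (l.take a) ≤ pvG (l.take b) := by
  induction b, hab using Nat.le_induction with
  | base => exact le_rfl
  | succ b hb ih => exact le_trans ih (pvG_take_mono_succ l b)

-- the cum table B builds: cum[k] = pvG (codes.take k)
def pvCumOf (l : List String) : List Int :=
  (List.range (l.length + 1)).map (fun k => pvG (l.take k))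

lemma pvCumOf_nil : pvCumOf [] = [0] := by simp [pvCumOf, pvG]

lemma pvCumOf_getD (l : List String) (k : Nat) (hk : k ≤ l.length) :
    (pvCumOf l).getD k 0 = pvG (l.take k) := by
  rw [pvCumOf, List.getD_eq_getElem _ _ (by simpa using Nat.lt_succ_of_le hk)]
  simp

lemma pvCumOf_snoc (pre : List String) (c : String) :
    pvCumOf (pre ++ [c]) = pvCumOf pre ++ [pvG (pre ++ [c])] := by
  unfold pvCumOf
  rw [show (pre ++ [c]).length + 1 = (pre.length + 1) + 1 by simp, List.range_succ,
    List.map_append]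
  congr 1
  · refine List.map_congr_left (fun k hk => ?_)
    have hk' : k ≤ pre.length := by
      have := List.mem_range.mp hk; omega
    rw [List.take_append_of_le_length hk']
  · simp only [List.map_cons, List.map_nil]
    congr 1
    rw [show pre.length + 1 = (pre ++ [c]).length by simp, List.take_length]

lemma pvStepB_cum (pre : List String) (c : String) :
    pvStepB (pvCumOf pre) ((pre.length : Int), c) = pvCumOf (pre ++ [c]) := by
  have hget : (pvCumOf pre).getD pre.length 0 = pvG pre := by
    rw [pvCumOf_getD pre pre.length le_rfl, List.take_length]
  have hv : pvG pre + (c.toList.length : Int) + (if pre.length = 0 then 0 else 2)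
      = pvG (pre ++ [c]) := (pvG_append_singleton pre c).symm
  have hif : (if (pre.length : Int) = 0 then (0:Int) else 2)
      = (if pre.length = 0 then (0:Int) else 2) := by
    simp
  unfold pvStepB
  simp only [PySem.List.pyGetD_natCast]
  rw [hget, PySem.Str.len_eq, hif, hv, pvCumOf_snoc]

lemma pvCum_build : ∀ (rest pre : List String),
    (PySem.List.enumerate rest (pre.length : Int)).foldl pvStepB (pvCumOf pre)
      = pvCumOf (pre ++ rest) := by
  intro rest
  induction rest with
  | nil => intro pre; simp [PySem.List.enumerate]
  | cons c rest ih =>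
    intro pre
    rw [show PySem.List.enumerate (c :: rest) (pre.length : Int)
        = ((pre.length : Int), c) :: PySem.List.enumerate rest ((pre.length : Int) + 1) from rfl]
    rw [List.foldl_cons, pvStepB_cum]
    have h := ih (pre ++ [c])
    have hlen : (((pre ++ [c]).length : Nat) : Int) = (pre.length : Int) + 1 := by
      simp [List.length_append]
    rw [hlen] at h
    rw [h]
    simp

-- greedy count of A's loop, extracted as a recursion
def pvGrd (m : Int) : Int → Bool → List String → Nat
  | _, _, [] => 0
  | cur, ne, c :: rest =>
    if cur + (PySem.Str.len c + (if ne then 2 else 0)) ≤ m then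
      pvGrd m (cur + (PySem.Str.len c + (if ne then 2 else 0))) true rest + 1
    else 0

lemma pvFoldA_broken (m : Int) : ∀ (rest : List String) (inc : List String) (cur : Int),
    rest.foldl (pvStepA m) (inc, cur, true) = (inc, cur, true) := by
  intro rest
  induction rest with
  | nil => intro inc cur; rfl
  | cons c rest ih => intro inc cur; rw [List.foldl_cons]; exact ih inc cur

lemma pvFoldA_spec (m : Int) : ∀ (rest pre : List String) (cur : Int),
    ∃ c' b', rest.foldl (pvStepA m) (pre, cur, false)
      = (pre ++ rest.take (pvGrd m cur (!pre.isEmpty) rest), c', b') := by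
  intro rest
  induction rest with
  | nil => intro pre cur; exact ⟨cur, false, by simp [pvGrd]⟩
  | cons c rest ih =>
    intro pre cur
    rw [List.foldl_cons]
    have hsep : (if (!pre.isEmpty) then (2:Int) else 0) = (if pre.isEmpty then 0 else 2) := by
      cases pre <;> simp
    by_cases h : cur + (PySem.Str.len c + (if pre.isEmpty then (0:Int) else 2)) ≤ m
    · have hstep : pvStepA m (pre, cur, false) c
          = (pre ++ [c], cur + (PySem.Str.len c + (if pre.isEmpty then 0 else 2)), false) := by
        show (if false = true then (pre, cur, false) else _) = _
        rw [if_neg (by simp)]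
        show (if cur + (PySem.Str.len c + (if pre.isEmpty then (0:Int) else 2)) ≤ m
              then (pre ++ [c], cur + (PySem.Str.len c + (if pre.isEmpty then (0:Int) else 2)), false)
              else (pre, cur, true)) = _
        rw [if_pos h]
      rw [hstep]
      obtain ⟨c', b', hb⟩ := ih (pre ++ [c]) (cur + (PySem.Str.len c + (if pre.isEmpty then 0 else 2)))
      have hne : ((pre ++ [c]).isEmpty) = false := by simp
      rw [hne] at hb
      simp only [Bool.not_false] at hb
      refine ⟨c', b', ?_⟩
      rw [hb]
      simp only [pvGrd, hsep]
      rw [if_pos h, List.take_succ_cons]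
      simp
    · have hstep : pvStepA m (pre, cur, false) c = (pre, cur, true) := by
        show (if false = true then (pre, cur, false) else _) = _
        rw [if_neg (by simp)]
        show (if cur + (PySem.Str.len c + (if pre.isEmpty then (0:Int) else 2)) ≤ m
              then (pre ++ [c], cur + (PySem.Str.len c + (if pre.isEmpty then (0:Int) else 2)), false)
              else (pre, cur, true)) = _
        rw [if_neg h]
      rw [hstep, pvFoldA_broken]
      simp only [pvGrd, hsep]
      rw [if_neg h]
      simp

lemma pvGrd_bounds (m : Int) : ∀ (rest pre : List String),
    (pre = [] ∨ pvG pre ≤ m) →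
    pvGrd m (pvG pre) (!pre.isEmpty) rest ≤ rest.length ∧
    (pvGrd m (pvG pre) (!pre.isEmpty) rest = 0 ∨
      pvG (pre ++ rest.take (pvGrd m (pvG pre) (!pre.isEmpty) rest)) ≤ m) ∧
    (pvGrd m (pvG pre) (!pre.isEmpty) rest = rest.length ∨
      m < pvG (pre ++ rest.take (pvGrd m (pvG pre) (!pre.isEmpty) rest + 1))) := by
  intro rest
  induction rest with
  | nil =>
    intro pre hpre
    exact ⟨by simp [pvGrd], Or.inl (by simp [pvGrd]), Or.inl (by simp [pvGrd])⟩
  | cons c rest ih =>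
    intro pre hpre
    have hglue : pvG pre + (PySem.Str.len c + (if (!pre.isEmpty) then (2:Int) else 0))
        = pvG (pre ++ [c]) := by
      rw [pvG_append_singleton, PySem.Str.len_eq]
      cases pre with
      | nil => simp
      | cons x xs => simp; ring
    by_cases h : pvG pre + (PySem.Str.len c + (if (!pre.isEmpty) then (2:Int) else 0)) ≤ m
    · have hrec := ih (pre ++ [c]) (Or.inr (hglue ▸ h))
      have hne : ((pre ++ [c]).isEmpty) = false := by simp
      rw [hne] at hrec
      simp only [Bool.not_false] at hrec
      rw [← hglue] at hrec
      obtain ⟨h1, h2, h3⟩ := hrec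
      simp only [pvGrd]
      rw [if_pos h]
      refine ⟨by simpa using Nat.succ_le_succ h1, Or.inr ?_, ?_⟩
      · rw [List.take_succ_cons, List.append_cons]
        rcases h2 with h2 | h2
        · rw [h2, List.take_zero, List.append_nil, ← hglue]
          exact h
        · exact h2
      · rcases h3 with h3 | h3
        · left
          rw [List.length_cons]
          omega
        · right
          rw [List.take_succ_cons, List.append_cons]
          exact h3
    · simp only [pvGrd]
      rw [if_neg h]
      refine ⟨Nat.zero_le _, Or.inl rfl, Or.inr ?_⟩
      rw [show (0:Nat) + 1 = 1 by rfl, List.take_succ_cons, List.take_zero, List.append_cons,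
        List.append_nil, ← hglue]
      omega

-- B's binary search returns the greatest index with cum ≤ budget (invariant form)
lemma pvBisect_spec (cum : List Int) (budget : Int) :
    ∀ (d lo hi : Nat), hi - lo ≤ d → lo ≤ hi →
    lo ≤ pvBisect cum budget lo hi ∧ pvBisect cum budget lo hi ≤ hi ∧
    (pvBisect cum budget lo hi = lo ∨ cum.getD (pvBisect cum budget lo hi) 0 ≤ budget) ∧
    (pvBisect cum budget lo hi = hi ∨ budget < cum.getD (pvBisect cum budget lo hi + 1) 0) := by
  intro d
  induction d with
  | zero =>
    intro lo hi hd hlh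
    have : lo = hi := by omega
    subst this
    rw [pvBisect]
    simp
  | succ d ih =>
    intro lo hi hd hlh
    rw [pvBisect]
    by_cases h : lo < hi
    · rw [if_pos h]
      by_cases hc : cum.getD ((lo + hi + 1) / 2) 0 ≤ budget
      · rw [if_pos hc]
        have hx := ih ((lo + hi + 1) / 2) hi (by omega) (by omega)
        refine ⟨by omega, hx.2.1, ?_, hx.2.2.2⟩
        rcases hx.2.2.1 with he | hle
        · exact Or.inr (by rw [he]; exact hc)
        · exact Or.inr hle
      · rw [if_neg hc]
        have hx := ih lo ((lo + hi + 1) / 2 - 1) (by omega) (by omega)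
        refine ⟨hx.1, by omega, hx.2.2.1, ?_⟩
        rcases hx.2.2.2 with he | hgt
        · right
          rw [he, show (lo + hi + 1) / 2 - 1 + 1 = (lo + hi + 1) / 2 by omega]
          omega
        · exact Or.inr hgt
    · rw [if_neg h]
      have : lo = hi := by omega
      simp [this]

-- uniqueness: two indices satisfying the "last fitting prefix" conditions coincide
lemma pvUnique (f : Nat → Int) (m : Int) (n k r : Nat)
    (mono : ∀ a b : Nat, a ≤ b → f a ≤ f b)
    (hk : k ≤ n) (hk0 : k = 0 ∨ f k ≤ m) (hk1 : k = n ∨ m < f (k + 1))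
    (hr : r ≤ n) (hr0 : r = 0 ∨ f r ≤ m) (hr1 : r = n ∨ m < f (r + 1)) : k = r := by
  rcases lt_trichotomy k r with h | h | h
  · exfalso
    have h1 : m < f (k + 1) := hk1.resolve_left (by omega)
    have h2 : f r ≤ m := hr0.resolve_left (by omega)
    have h3 := mono (k + 1) r (by omega)
    linarith
  · exact h
  · exfalso
    have h1 : m < f (r + 1) := hr1.resolve_left (by omega)
    have h2 : f k ≤ m := hk0.resolve_left (by omega)
    have h3 := mono (r + 1) k (by omega)
    linarith

-- ===== VERDICT (by name: the statement is the Claim_ definition above) =====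
theorem generate_multi_flair_text_py_spec : Claim_equal_generate_multi_flair_text_py := by
  intro language_codes max_length _
  unfold Spec_generate_multi_flair_text_py
  unfold generate_multi_flair_text_py generate_multi_flair_text_py_alt
  dsimp only
  set cs := PySem.List.sorted language_codes (fun x => x) false with hcs
  have hcum : (PySem.List.enumerate cs).foldl pvStepB [0] = pvCumOf cs := by
    have h := pvCum_build cs []
    simp only [List.length_nil, List.nil_append, Nat.cast_zero] at h
    rw [show PySem.List.enumerate cs = PySem.List.enumerate cs 0 from rfl, ← h, pvCumOf_nil]
  have hb20 : PySem.Str.len "Multiple Languages [" = 20 := by decide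
  have hb1 : PySem.Str.len "]" = 1 := by decide
  have hlenfull : PySem.Str.len ("Multiple Languages [" ++ PySem.Str.join ", " cs ++ "]")
      = 21 + pvG cs := by
    rw [PySem.Str.len_append, PySem.Str.len_append, hb20, hb1, PySem.Str.len_eq, pvJoinLen]
    ring
  rw [hcum, hb20, hb1, hlenfull]
  have hmono : ∀ a b : Nat, a ≤ b → pvG (cs.take a) ≤ pvG (cs.take b) :=
    fun a b hab => pvG_take_mono cs a b hab
  obtain ⟨-, hrn, hr0, hr1⟩ :=
    pvBisect_spec (pvCumOf cs) (max_length - 21) cs.length 0 cs.length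
      (by omega) (Nat.zero_le _)
  set r := pvBisect (pvCumOf cs) (max_length - 21) 0 cs.length with hrdef
  have hr0' : r = 0 ∨ pvG (cs.take r) ≤ max_length - 21 := by
    rcases hr0 with h | h
    · exact Or.inl h
    · right; rwa [pvCumOf_getD _ _ hrn] at h
  have hr1' : r = cs.length ∨ max_length - 21 < pvG (cs.take (r + 1)) := by
    rcases hr1 with h | h
    · exact Or.inl h
    · by_cases hc : r = cs.length
      · exact Or.inl hc
      · right; rwa [pvCumOf_getD _ _ (by omega)] at h
  by_cases hfit : 21 + pvG cs ≤ max_length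
  · rw [if_pos hfit]
    have hreq : r = cs.length := by
      rcases hr1' with h | h
      · exact h
      · exfalso
        have h2 : pvG (cs.take (r + 1)) ≤ pvG cs := by
          by_cases hc : r + 1 ≤ cs.length
          · have := hmono (r + 1) cs.length hc
            rwa [List.take_length] at this
          · rw [List.take_of_length_le (by omega)]
        linarith
    rw [hreq, List.take_length]
  · rw [if_neg hfit]
    have hm : max_length - 20 - 1 = max_length - 21 := by ring
    rw [hm]
    obtain ⟨c', b', hfold⟩ := pvFoldA_spec (max_length - 21) cs [] 0
    simp only [List.isEmpty_nil, Bool.not_true, List.nil_append] at hfold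
    rw [hfold]
    have hg := pvGrd_bounds (max_length - 21) cs [] (Or.inl rfl)
    have h0 : pvG [] = 0 := by simp [pvG]
    rw [h0] at hg
    simp only [List.isEmpty_nil, Bool.not_true, List.nil_append] at hg
    have hkeq : pvGrd (max_length - 21) 0 false cs = r :=
      pvUnique (fun j => pvG (cs.take j)) (max_length - 21) cs.length
        (pvGrd (max_length - 21) 0 false cs) r hmono hg.1 hg.2.1 hg.2.2 hrn hr0' hr1'
    rw [hkeq]
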